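-- pv_equiv track=rewrite | github.com/flelrmu/crime-analysis | src/utils/mapping.py | map_location_category
-- ===== SOURCE A (Python) =====
-- def map_location_category(desc):
--     """Map location description to category"""
--     location_map = {
--         "Residential": [
--             "APARTMENT", "RESIDENCE", "HOUSE", "RESIDENCE-GARAGE", "RESIDENTIAL YARD (FRONT/BACK)",
--             "RESIDENCE PORCH/HALLWAY", "RESIDENCE - GARAGE", "RESIDENCE - PORCH / HALLWAY",
--             "RESIDENCE - YARD (FRONT / BACK)", "PORCH", "YARD", "VESTIBULE"
--         ],
--         "Commercial": [
--             "DRUG STORE", "BAR OR TAVERN", "GROCERY FOOD STORE", "BANK", "CONVENIENCE STORE",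
--             "SMALL RETAIL STORE", "RESTAURANT", "DEPARTMENT STORE", "HOTEL / MOTEL", "MOTEL",
--             "TAVERN/LIQUOR STORE", "TAVERN / LIQUOR STORE", "GAS STATION", "GAS STATION DRIVE/PROP.",
--             "CAR WASH", "APPLIANCE STORE", "AUTO / BOAT / RV DEALERSHIP", "PAWN SHOP", "BARBERSHOP",
--             "BARBER SHOP/BEAUTY SALON", "NEWSSTAND", "CLEANING STORE", "CURRENCY EXCHANGE"
--         ],
--         "Transportation": [
--             "STREET", "SIDEWALK", "PARKING LOT/GARAGE(NON.RESID.)", "PARKING LOT / GARAGE (NON RESIDENTIAL)",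
--             "CTA PLATFORM", "CTA BUS", "CTA TRAIN", "CTA BUS STOP", "CTA STATION", "CTA GARAGE / OTHER PROPERTY",
--             "CTA PARKING LOT / GARAGE / OTHER PROPERTY", "CTA TRACKS - RIGHT OF WAY", "CTA PROPERTY",
--             "VEHICLE NON-COMMERCIAL", "VEHICLE - OTHER RIDE SHARE SERVICE (E.G., UBER, LYFT)",
--             "VEHICLE - OTHER RIDE SHARE SERVICE (LYFT, UBER, ETC.)", "VEHICLE - OTHER RIDE SERVICE",
--             "VEHICLE-COMMERCIAL", "VEHICLE - COMMERCIAL", "TAXICAB", "DELIVERY TRUCK", "VEHICLE - DELIVERY TRUCK",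
--             "VEHICLE - COMMERCIAL: TROLLEY BUS", "DRIVEWAY - RESIDENTIAL", "OTHER COMMERCIAL TRANSPORTATION"
--         ],
--         "Educational": [
--             "SCHOOL, PRIVATE, BUILDING", "SCHOOL, PRIVATE, GROUNDS", "SCHOOL - PRIVATE GROUNDS",
--             "SCHOOL - PRIVATE BUILDING", "SCHOOL, PUBLIC, BUILDING", "SCHOOL, PUBLIC, GROUNDS",
--             "SCHOOL - PUBLIC GROUNDS", "SCHOOL - PUBLIC BUILDING", "COLLEGE/UNIVERSITY GROUNDS",
--             "COLLEGE / UNIVERSITY - GROUNDS", "COLLEGE/UNIVERSITY RESIDENCE HALL"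
--         ],
--         "Healthcare": [
--             "HOSPITAL BUILDING/GROUNDS", "HOSPITAL BUILDING / GROUNDS", "MEDICAL/DENTAL OFFICE",
--             "MEDICAL / DENTAL OFFICE", "NURSING HOME/RETIREMENT HOME", "NURSING / RETIREMENT HOME",
--             "ANIMAL HOSPITAL"
--         ],
--         "Recreational": [
--             "ATHLETIC CLUB", "PARK PROPERTY", "LAKEFRONT / WATERFRONT / RIVERBANK", "LAKEFRONT/WATERFRONT/RIVERBANK",
--             "MOVIE HOUSE / THEATER", "MOVIE HOUSE/THEATER", "BOWLING ALLEY", "SPORTS ARENA/STADIUM",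
--             "SPORTS ARENA / STADIUM", "POOL ROOM", "FOREST PRESERVE", "WOODED AREA", "FARM", "KENNEL", "CEMETARY"
--         ],
--         "Religious": [
--             "CHURCH/SYNAGOGUE/PLACE OF WORSHIP", "CHURCH / SYNAGOGUE / PLACE OF WORSHIP"
--         ],
--         "Government": [
--             "GOVERNMENT BUILDING/PROPERTY", "GOVERNMENT BUILDING / PROPERTY", "FEDERAL BUILDING",
--             "FIRE STATION", "POLICE FACILITY / VEHICLE PARKING LOT", "POLICE FACILITY/VEH PARKING LOT", "JAIL / LOCK-UP FACILITY"
--         ],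
--         "Industrial": [
--             "FACTORY/MANUFACTURING BUILDING", "FACTORY / MANUFACTURING BUILDING", "WAREHOUSE", "GARAGE/AUTO REPAIR"
--         ],
--         "Vacant": [
--             "VACANT LOT / LAND", "VACANT LOT/LAND", "VACANT LOT", "ABANDONED BUILDING"
--         ],
--         "Airport": [
--             "AIRPORT BUILDING NON-TERMINAL - NON-SECURE AREA", "AIRPORT BUILDING NON-TERMINAL - SECURE AREA",
--             "AIRPORT EXTERIOR - NON-SECURE AREA", "AIRPORT EXTERIOR - SECURE AREA",
--             "AIRPORT PARKING LOT", "AIRPORT TERMINAL LOWER LEVEL - NON-SECURE AREA",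
--             "AIRPORT TERMINAL LOWER LEVEL - SECURE AREA", "AIRPORT TERMINAL UPPER LEVEL - NON-SECURE AREA",
--             "AIRPORT TERMINAL UPPER LEVEL - SECURE AREA", "AIRPORT TRANSPORTATION SYSTEM (ATS)",
--             "AIRCRAFT"
--         ],
--         "Vehicle": [
--             "AUTO", "TRAILER"
--         ],
--         "Other/Unknown": [
--             "OTHER", "OTHER (SPECIFY)", "OTHER RAILROAD PROP / TRAIN DEPOT", "OTHER RAILROAD PROPERTY / TRAIN DEPOT",
--             "COIN OPERATED MACHINE", "STAIRWELL", "HALLWAY", "LIBRARY", "CHA APARTMENT", "CHA GROUNDS",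
--             "CHA HALLWAY / STAIRWELL / ELEVATOR", "CHA HALLWAY/STAIRWELL/ELEVATOR", "CHA PARKING LOT/GROUNDS",
--             "CHA PARKING LOT / GROUNDS"
--         ]
--     }
--
--     for category, desc_list in location_map.items():
--         if desc in desc_list:
--             return category
--     return "Other/Unknown"
-- ===== SOURCE B (Python) =====
-- # Flat description -> category dict literal (no duplicate descriptions), one hash lookup per call.
-- _CATEGORY_OF = {
--     'APARTMENT': 'Residential',
--     'RESIDENCE': 'Residential',
--     'HOUSE': 'Residential',
--     'RESIDENCE-GARAGE': 'Residential',
--     'RESIDENTIAL YARD (FRONT/BACK)': 'Residential',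
--     'RESIDENCE PORCH/HALLWAY': 'Residential',
--     'RESIDENCE - GARAGE': 'Residential',
--     'RESIDENCE - PORCH / HALLWAY': 'Residential',
--     'RESIDENCE - YARD (FRONT / BACK)': 'Residential',
--     'PORCH': 'Residential',
--     'YARD': 'Residential',
--     'VESTIBULE': 'Residential',
--     'DRUG STORE': 'Commercial',
--     'BAR OR TAVERN': 'Commercial',
--     'GROCERY FOOD STORE': 'Commercial',
--     'BANK': 'Commercial',
--     'CONVENIENCE STORE': 'Commercial',
--     'SMALL RETAIL STORE': 'Commercial',
--     'RESTAURANT': 'Commercial',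
--     'DEPARTMENT STORE': 'Commercial',
--     'HOTEL / MOTEL': 'Commercial',
--     'MOTEL': 'Commercial',
--     'TAVERN/LIQUOR STORE': 'Commercial',
--     'TAVERN / LIQUOR STORE': 'Commercial',
--     'GAS STATION': 'Commercial',
--     'GAS STATION DRIVE/PROP.': 'Commercial',
--     'CAR WASH': 'Commercial',
--     'APPLIANCE STORE': 'Commercial',
--     'AUTO / BOAT / RV DEALERSHIP': 'Commercial',
--     'PAWN SHOP': 'Commercial',
--     'BARBERSHOP': 'Commercial',
--     'BARBER SHOP/BEAUTY SALON': 'Commercial',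
--     'NEWSSTAND': 'Commercial',
--     'CLEANING STORE': 'Commercial',
--     'CURRENCY EXCHANGE': 'Commercial',
--     'STREET': 'Transportation',
--     'SIDEWALK': 'Transportation',
--     'PARKING LOT/GARAGE(NON.RESID.)': 'Transportation',
--     'PARKING LOT / GARAGE (NON RESIDENTIAL)': 'Transportation',
--     'CTA PLATFORM': 'Transportation',
--     'CTA BUS': 'Transportation',
--     'CTA TRAIN': 'Transportation',
--     'CTA BUS STOP': 'Transportation',
--     'CTA STATION': 'Transportation',
--     'CTA GARAGE / OTHER PROPERTY': 'Transportation',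
--     'CTA PARKING LOT / GARAGE / OTHER PROPERTY': 'Transportation',
--     'CTA TRACKS - RIGHT OF WAY': 'Transportation',
--     'CTA PROPERTY': 'Transportation',
--     'VEHICLE NON-COMMERCIAL': 'Transportation',
--     'VEHICLE - OTHER RIDE SHARE SERVICE (E.G., UBER, LYFT)': 'Transportation',
--     'VEHICLE - OTHER RIDE SHARE SERVICE (LYFT, UBER, ETC.)': 'Transportation',
--     'VEHICLE - OTHER RIDE SERVICE': 'Transportation',
--     'VEHICLE-COMMERCIAL': 'Transportation',
--     'VEHICLE - COMMERCIAL': 'Transportation',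
--     'TAXICAB': 'Transportation',
--     'DELIVERY TRUCK': 'Transportation',
--     'VEHICLE - DELIVERY TRUCK': 'Transportation',
--     'VEHICLE - COMMERCIAL: TROLLEY BUS': 'Transportation',
--     'DRIVEWAY - RESIDENTIAL': 'Transportation',
--     'OTHER COMMERCIAL TRANSPORTATION': 'Transportation',
--     'SCHOOL, PRIVATE, BUILDING': 'Educational',
--     'SCHOOL, PRIVATE, GROUNDS': 'Educational',
--     'SCHOOL - PRIVATE GROUNDS': 'Educational',
--     'SCHOOL - PRIVATE BUILDING': 'Educational',
--     'SCHOOL, PUBLIC, BUILDING': 'Educational',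
--     'SCHOOL, PUBLIC, GROUNDS': 'Educational',
--     'SCHOOL - PUBLIC GROUNDS': 'Educational',
--     'SCHOOL - PUBLIC BUILDING': 'Educational',
--     'COLLEGE/UNIVERSITY GROUNDS': 'Educational',
--     'COLLEGE / UNIVERSITY - GROUNDS': 'Educational',
--     'COLLEGE/UNIVERSITY RESIDENCE HALL': 'Educational',
--     'HOSPITAL BUILDING/GROUNDS': 'Healthcare',
--     'HOSPITAL BUILDING / GROUNDS': 'Healthcare',
--     'MEDICAL/DENTAL OFFICE': 'Healthcare',
--     'MEDICAL / DENTAL OFFICE': 'Healthcare',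
--     'NURSING HOME/RETIREMENT HOME': 'Healthcare',
--     'NURSING / RETIREMENT HOME': 'Healthcare',
--     'ANIMAL HOSPITAL': 'Healthcare',
--     'ATHLETIC CLUB': 'Recreational',
--     'PARK PROPERTY': 'Recreational',
--     'LAKEFRONT / WATERFRONT / RIVERBANK': 'Recreational',
--     'LAKEFRONT/WATERFRONT/RIVERBANK': 'Recreational',
--     'MOVIE HOUSE / THEATER': 'Recreational',
--     'MOVIE HOUSE/THEATER': 'Recreational',
--     'BOWLING ALLEY': 'Recreational',
--     'SPORTS ARENA/STADIUM': 'Recreational',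
--     'SPORTS ARENA / STADIUM': 'Recreational',
--     'POOL ROOM': 'Recreational',
--     'FOREST PRESERVE': 'Recreational',
--     'WOODED AREA': 'Recreational',
--     'FARM': 'Recreational',
--     'KENNEL': 'Recreational',
--     'CEMETARY': 'Recreational',
--     'CHURCH/SYNAGOGUE/PLACE OF WORSHIP': 'Religious',
--     'CHURCH / SYNAGOGUE / PLACE OF WORSHIP': 'Religious',
--     'GOVERNMENT BUILDING/PROPERTY': 'Government',
--     'GOVERNMENT BUILDING / PROPERTY': 'Government',
--     'FEDERAL BUILDING': 'Government',
--     'FIRE STATION': 'Government',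
--     'POLICE FACILITY / VEHICLE PARKING LOT': 'Government',
--     'POLICE FACILITY/VEH PARKING LOT': 'Government',
--     'JAIL / LOCK-UP FACILITY': 'Government',
--     'FACTORY/MANUFACTURING BUILDING': 'Industrial',
--     'FACTORY / MANUFACTURING BUILDING': 'Industrial',
--     'WAREHOUSE': 'Industrial',
--     'GARAGE/AUTO REPAIR': 'Industrial',
--     'VACANT LOT / LAND': 'Vacant',
--     'VACANT LOT/LAND': 'Vacant',
--     'VACANT LOT': 'Vacant',
--     'ABANDONED BUILDING': 'Vacant',
--     'AIRPORT BUILDING NON-TERMINAL - NON-SECURE AREA': 'Airport',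
--     'AIRPORT BUILDING NON-TERMINAL - SECURE AREA': 'Airport',
--     'AIRPORT EXTERIOR - NON-SECURE AREA': 'Airport',
--     'AIRPORT EXTERIOR - SECURE AREA': 'Airport',
--     'AIRPORT PARKING LOT': 'Airport',
--     'AIRPORT TERMINAL LOWER LEVEL - NON-SECURE AREA': 'Airport',
--     'AIRPORT TERMINAL LOWER LEVEL - SECURE AREA': 'Airport',
--     'AIRPORT TERMINAL UPPER LEVEL - NON-SECURE AREA': 'Airport',
--     'AIRPORT TERMINAL UPPER LEVEL - SECURE AREA': 'Airport',
--     'AIRPORT TRANSPORTATION SYSTEM (ATS)': 'Airport',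
--     'AIRCRAFT': 'Airport',
--     'AUTO': 'Vehicle',
--     'TRAILER': 'Vehicle',
--     'OTHER': 'Other/Unknown',
--     'OTHER (SPECIFY)': 'Other/Unknown',
--     'OTHER RAILROAD PROP / TRAIN DEPOT': 'Other/Unknown',
--     'OTHER RAILROAD PROPERTY / TRAIN DEPOT': 'Other/Unknown',
--     'COIN OPERATED MACHINE': 'Other/Unknown',
--     'STAIRWELL': 'Other/Unknown',
--     'HALLWAY': 'Other/Unknown',
--     'LIBRARY': 'Other/Unknown',
--     'CHA APARTMENT': 'Other/Unknown',
--     'CHA GROUNDS': 'Other/Unknown',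
--     'CHA HALLWAY / STAIRWELL / ELEVATOR': 'Other/Unknown',
--     'CHA HALLWAY/STAIRWELL/ELEVATOR': 'Other/Unknown',
--     'CHA PARKING LOT/GROUNDS': 'Other/Unknown',
--     'CHA PARKING LOT / GROUNDS': 'Other/Unknown',
-- }
--
--
-- def map_location_category(desc):
--     """Map location description to category"""
--     return _CATEGORY_OF.get(desc, "Other/Unknown")
-- ===== Notes on version B (the rewrite author's own statement) =====
-- stated objective: idiomatic
-- what changed: Replaces the per-call loop over a category->description-list table with linear membership scans by a flat description->category dict literal (the table inverted once, no duplicate descriptions), so the body is a single hash lookup with the 'Other/Unknown' default.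
import Mathlib
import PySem

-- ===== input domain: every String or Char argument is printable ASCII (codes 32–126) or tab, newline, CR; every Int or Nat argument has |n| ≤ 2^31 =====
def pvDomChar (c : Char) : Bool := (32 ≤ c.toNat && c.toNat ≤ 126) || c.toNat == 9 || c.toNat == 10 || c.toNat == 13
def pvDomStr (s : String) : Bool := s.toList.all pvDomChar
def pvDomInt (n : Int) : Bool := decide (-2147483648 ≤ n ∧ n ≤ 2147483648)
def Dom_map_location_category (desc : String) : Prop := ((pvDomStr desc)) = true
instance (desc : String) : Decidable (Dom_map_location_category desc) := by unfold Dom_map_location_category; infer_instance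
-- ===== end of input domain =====

-- B replaces A's per-call loop over a category→description-list table (linear membership scans)
-- by a flat description→category dict literal (no duplicate descriptions) and a single lookup.

-- ===== PORT A =====
-- A's nested table, the dict literal of Source A in insertion order.
def locationMap : List (String × List String) := [
  ("Residential", ["APARTMENT", "RESIDENCE", "HOUSE", "RESIDENCE-GARAGE", "RESIDENTIAL YARD (FRONT/BACK)", "RESIDENCE PORCH/HALLWAY", "RESIDENCE - GARAGE", "RESIDENCE - PORCH / HALLWAY", "RESIDENCE - YARD (FRONT / BACK)", "PORCH", "YARD", "VESTIBULE"]),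
  ("Commercial", ["DRUG STORE", "BAR OR TAVERN", "GROCERY FOOD STORE", "BANK", "CONVENIENCE STORE", "SMALL RETAIL STORE", "RESTAURANT", "DEPARTMENT STORE", "HOTEL / MOTEL", "MOTEL", "TAVERN/LIQUOR STORE", "TAVERN / LIQUOR STORE", "GAS STATION", "GAS STATION DRIVE/PROP.", "CAR WASH", "APPLIANCE STORE", "AUTO / BOAT / RV DEALERSHIP", "PAWN SHOP", "BARBERSHOP", "BARBER SHOP/BEAUTY SALON", "NEWSSTAND", "CLEANING STORE", "CURRENCY EXCHANGE"]),
  ("Transportation", ["STREET", "SIDEWALK", "PARKING LOT/GARAGE(NON.RESID.)", "PARKING LOT / GARAGE (NON RESIDENTIAL)", "CTA PLATFORM", "CTA BUS", "CTA TRAIN", "CTA BUS STOP", "CTA STATION", "CTA GARAGE / OTHER PROPERTY", "CTA PARKING LOT / GARAGE / OTHER PROPERTY", "CTA TRACKS - RIGHT OF WAY", "CTA PROPERTY", "VEHICLE NON-COMMERCIAL", "VEHICLE - OTHER RIDE SHARE SERVICE (E.G., UBER, LYFT)", "VEHICLE - OTHER RIDE SHARE SERVICE (LYFT, UBER, ETC.)",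 "VEHICLE - OTHER RIDE SERVICE", "VEHICLE-COMMERCIAL", "VEHICLE - COMMERCIAL", "TAXICAB", "DELIVERY TRUCK", "VEHICLE - DELIVERY TRUCK", "VEHICLE - COMMERCIAL: TROLLEY BUS", "DRIVEWAY - RESIDENTIAL", "OTHER COMMERCIAL TRANSPORTATION"]),
  ("Educational", ["SCHOOL, PRIVATE, BUILDING", "SCHOOL, PRIVATE, GROUNDS", "SCHOOL - PRIVATE GROUNDS", "SCHOOL - PRIVATE BUILDING", "SCHOOL, PUBLIC, BUILDING", "SCHOOL, PUBLIC, GROUNDS", "SCHOOL - PUBLIC GROUNDS", "SCHOOL - PUBLIC BUILDING", "COLLEGE/UNIVERSITY GROUNDS", "COLLEGE / UNIVERSITY - GROUNDS", "COLLEGE/UNIVERSITY RESIDENCE HALL"]),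
  ("Healthcare", ["HOSPITAL BUILDING/GROUNDS", "HOSPITAL BUILDING / GROUNDS", "MEDICAL/DENTAL OFFICE", "MEDICAL / DENTAL OFFICE", "NURSING HOME/RETIREMENT HOME", "NURSING / RETIREMENT HOME", "ANIMAL HOSPITAL"]),
  ("Recreational", ["ATHLETIC CLUB", "PARK PROPERTY", "LAKEFRONT / WATERFRONT / RIVERBANK", "LAKEFRONT/WATERFRONT/RIVERBANK", "MOVIE HOUSE / THEATER", "MOVIE HOUSE/THEATER", "BOWLING ALLEY", "SPORTS ARENA/STADIUM", "SPORTS ARENA / STADIUM", "POOL ROOM", "FOREST PRESERVE", "WOODED AREA", "FARM", "KENNEL", "CEMETARY"]),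
  ("Religious", ["CHURCH/SYNAGOGUE/PLACE OF WORSHIP", "CHURCH / SYNAGOGUE / PLACE OF WORSHIP"]),
  ("Government", ["GOVERNMENT BUILDING/PROPERTY", "GOVERNMENT BUILDING / PROPERTY", "FEDERAL BUILDING", "FIRE STATION", "POLICE FACILITY / VEHICLE PARKING LOT", "POLICE FACILITY/VEH PARKING LOT", "JAIL / LOCK-UP FACILITY"]),
  ("Industrial", ["FACTORY/MANUFACTURING BUILDING", "FACTORY / MANUFACTURING BUILDING", "WAREHOUSE", "GARAGE/AUTO REPAIR"]),
  ("Vacant", ["VACANT LOT / LAND", "VACANT LOT/LAND", "VACANT LOT", "ABANDONED BUILDING"]),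
  ("Airport", ["AIRPORT BUILDING NON-TERMINAL - NON-SECURE AREA", "AIRPORT BUILDING NON-TERMINAL - SECURE AREA", "AIRPORT EXTERIOR - NON-SECURE AREA", "AIRPORT EXTERIOR - SECURE AREA", "AIRPORT PARKING LOT", "AIRPORT TERMINAL LOWER LEVEL - NON-SECURE AREA", "AIRPORT TERMINAL LOWER LEVEL - SECURE AREA", "AIRPORT TERMINAL UPPER LEVEL - NON-SECURE AREA", "AIRPORT TERMINAL UPPER LEVEL - SECURE AREA", "AIRPORT TRANSPORTATION SYSTEM (ATS)", "AIRCRAFT"]),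
  ("Vehicle", ["AUTO", "TRAILER"]),
  ("Other/Unknown", ["OTHER", "OTHER (SPECIFY)", "OTHER RAILROAD PROP / TRAIN DEPOT", "OTHER RAILROAD PROPERTY / TRAIN DEPOT", "COIN OPERATED MACHINE", "STAIRWELL", "HALLWAY", "LIBRARY", "CHA APARTMENT", "CHA GROUNDS", "CHA HALLWAY / STAIRWELL / ELEVATOR", "CHA HALLWAY/STAIRWELL/ELEVATOR", "CHA PARKING LOT/GROUNDS", "CHA PARKING LOT / GROUNDS"]) ]

-- A's loop: for category, desc_list in location_map.items(): if desc in desc_list: return category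
def locFind : List (String × List String) → String → String
  | [], _ => "Other/Unknown"
  | (cat, lst) :: rest, desc => if desc ∈ lst then cat else locFind rest desc

def map_location_category (desc : String) : String := locFind locationMap desc

-- ===== PORT B =====
-- Source B's flat dict literal _CATEGORY_OF: description → category, one pair per entry.
def categoryOf : PySem.Dict String String := PySem.Dict.mk [
  ("APARTMENT", "Residential"),
  ("RESIDENCE", "Residential"),
  ("HOUSE", "Residential"),
  ("RESIDENCE-GARAGE", "Residential"),
  ("RESIDENTIAL YARD (FRONT/BACK)", "Residential"),
  ("RESIDENCE PORCH/HALLWAY", "Residential"),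
  ("RESIDENCE - GARAGE", "Residential"),
  ("RESIDENCE - PORCH / HALLWAY", "Residential"),
  ("RESIDENCE - YARD (FRONT / BACK)", "Residential"),
  ("PORCH", "Residential"),
  ("YARD", "Residential"),
  ("VESTIBULE", "Residential"),
  ("DRUG STORE", "Commercial"),
  ("BAR OR TAVERN", "Commercial"),
  ("GROCERY FOOD STORE", "Commercial"),
  ("BANK", "Commercial"),
  ("CONVENIENCE STORE", "Commercial"),
  ("SMALL RETAIL STORE", "Commercial"),
  ("RESTAURANT", "Commercial"),
  ("DEPARTMENT STORE", "Commercial"),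
  ("HOTEL / MOTEL", "Commercial"),
  ("MOTEL", "Commercial"),
  ("TAVERN/LIQUOR STORE", "Commercial"),
  ("TAVERN / LIQUOR STORE", "Commercial"),
  ("GAS STATION", "Commercial"),
  ("GAS STATION DRIVE/PROP.", "Commercial"),
  ("CAR WASH", "Commercial"),
  ("APPLIANCE STORE", "Commercial"),
  ("AUTO / BOAT / RV DEALERSHIP", "Commercial"),
  ("PAWN SHOP", "Commercial"),
  ("BARBERSHOP", "Commercial"),
  ("BARBER SHOP/BEAUTY SALON", "Commercial"),
  ("NEWSSTAND", "Commercial"),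
  ("CLEANING STORE", "Commercial"),
  ("CURRENCY EXCHANGE", "Commercial"),
  ("STREET", "Transportation"),
  ("SIDEWALK", "Transportation"),
  ("PARKING LOT/GARAGE(NON.RESID.)", "Transportation"),
  ("PARKING LOT / GARAGE (NON RESIDENTIAL)", "Transportation"),
  ("CTA PLATFORM", "Transportation"),
  ("CTA BUS", "Transportation"),
  ("CTA TRAIN", "Transportation"),
  ("CTA BUS STOP", "Transportation"),
  ("CTA STATION", "Transportation"),
  ("CTA GARAGE / OTHER PROPERTY", "Transportation"),
  ("CTA PARKING LOT / GARAGE / OTHER PROPERTY", "Transportation"),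
  ("CTA TRACKS - RIGHT OF WAY", "Transportation"),
  ("CTA PROPERTY", "Transportation"),
  ("VEHICLE NON-COMMERCIAL", "Transportation"),
  ("VEHICLE - OTHER RIDE SHARE SERVICE (E.G., UBER, LYFT)", "Transportation"),
  ("VEHICLE - OTHER RIDE SHARE SERVICE (LYFT, UBER, ETC.)", "Transportation"),
  ("VEHICLE - OTHER RIDE SERVICE", "Transportation"),
  ("VEHICLE-COMMERCIAL", "Transportation"),
  ("VEHICLE - COMMERCIAL", "Transportation"),
  ("TAXICAB", "Transportation"),
  ("DELIVERY TRUCK", "Transportation"),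
  ("VEHICLE - DELIVERY TRUCK", "Transportation"),
  ("VEHICLE - COMMERCIAL: TROLLEY BUS", "Transportation"),
  ("DRIVEWAY - RESIDENTIAL", "Transportation"),
  ("OTHER COMMERCIAL TRANSPORTATION", "Transportation"),
  ("SCHOOL, PRIVATE, BUILDING", "Educational"),
  ("SCHOOL, PRIVATE, GROUNDS", "Educational"),
  ("SCHOOL - PRIVATE GROUNDS", "Educational"),
  ("SCHOOL - PRIVATE BUILDING", "Educational"),
  ("SCHOOL, PUBLIC, BUILDING", "Educational"),
  ("SCHOOL, PUBLIC, GROUNDS", "Educational"),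
  ("SCHOOL - PUBLIC GROUNDS", "Educational"),
  ("SCHOOL - PUBLIC BUILDING", "Educational"),
  ("COLLEGE/UNIVERSITY GROUNDS", "Educational"),
  ("COLLEGE / UNIVERSITY - GROUNDS", "Educational"),
  ("COLLEGE/UNIVERSITY RESIDENCE HALL", "Educational"),
  ("HOSPITAL BUILDING/GROUNDS", "Healthcare"),
  ("HOSPITAL BUILDING / GROUNDS", "Healthcare"),
  ("MEDICAL/DENTAL OFFICE", "Healthcare"),
  ("MEDICAL / DENTAL OFFICE", "Healthcare"),
  ("NURSING HOME/RETIREMENT HOME", "Healthcare"),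
  ("NURSING / RETIREMENT HOME", "Healthcare"),
  ("ANIMAL HOSPITAL", "Healthcare"),
  ("ATHLETIC CLUB", "Recreational"),
  ("PARK PROPERTY", "Recreational"),
  ("LAKEFRONT / WATERFRONT / RIVERBANK", "Recreational"),
  ("LAKEFRONT/WATERFRONT/RIVERBANK", "Recreational"),
  ("MOVIE HOUSE / THEATER", "Recreational"),
  ("MOVIE HOUSE/THEATER", "Recreational"),
  ("BOWLING ALLEY", "Recreational"),
  ("SPORTS ARENA/STADIUM", "Recreational"),
  ("SPORTS ARENA / STADIUM", "Recreational"),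
  ("POOL ROOM", "Recreational"),
  ("FOREST PRESERVE", "Recreational"),
  ("WOODED AREA", "Recreational"),
  ("FARM", "Recreational"),
  ("KENNEL", "Recreational"),
  ("CEMETARY", "Recreational"),
  ("CHURCH/SYNAGOGUE/PLACE OF WORSHIP", "Religious"),
  ("CHURCH / SYNAGOGUE / PLACE OF WORSHIP", "Religious"),
  ("GOVERNMENT BUILDING/PROPERTY", "Government"),
  ("GOVERNMENT BUILDING / PROPERTY", "Government"),
  ("FEDERAL BUILDING", "Government"),
  ("FIRE STATION", "Government"),
  ("POLICE FACILITY / VEHICLE PARKING LOT", "Government"),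
  ("POLICE FACILITY/VEH PARKING LOT", "Government"),
  ("JAIL / LOCK-UP FACILITY", "Government"),
  ("FACTORY/MANUFACTURING BUILDING", "Industrial"),
  ("FACTORY / MANUFACTURING BUILDING", "Industrial"),
  ("WAREHOUSE", "Industrial"),
  ("GARAGE/AUTO REPAIR", "Industrial"),
  ("VACANT LOT / LAND", "Vacant"),
  ("VACANT LOT/LAND", "Vacant"),
  ("VACANT LOT", "Vacant"),
  ("ABANDONED BUILDING", "Vacant"),
  ("AIRPORT BUILDING NON-TERMINAL - NON-SECURE AREA", "Airport"),
  ("AIRPORT BUILDING NON-TERMINAL - SECURE AREA", "Airport"),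
  ("AIRPORT EXTERIOR - NON-SECURE AREA", "Airport"),
  ("AIRPORT EXTERIOR - SECURE AREA", "Airport"),
  ("AIRPORT PARKING LOT", "Airport"),
  ("AIRPORT TERMINAL LOWER LEVEL - NON-SECURE AREA", "Airport"),
  ("AIRPORT TERMINAL LOWER LEVEL - SECURE AREA", "Airport"),
  ("AIRPORT TERMINAL UPPER LEVEL - NON-SECURE AREA", "Airport"),
  ("AIRPORT TERMINAL UPPER LEVEL - SECURE AREA", "Airport"),
  ("AIRPORT TRANSPORTATION SYSTEM (ATS)", "Airport"),
  ("AIRCRAFT", "Airport"),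
  ("AUTO", "Vehicle"),
  ("TRAILER", "Vehicle"),
  ("OTHER", "Other/Unknown"),
  ("OTHER (SPECIFY)", "Other/Unknown"),
  ("OTHER RAILROAD PROP / TRAIN DEPOT", "Other/Unknown"),
  ("OTHER RAILROAD PROPERTY / TRAIN DEPOT", "Other/Unknown"),
  ("COIN OPERATED MACHINE", "Other/Unknown"),
  ("STAIRWELL", "Other/Unknown"),
  ("HALLWAY", "Other/Unknown"),
  ("LIBRARY", "Other/Unknown"),
  ("CHA APARTMENT", "Other/Unknown"),
  ("CHA GROUNDS", "Other/Unknown"),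
  ("CHA HALLWAY / STAIRWELL / ELEVATOR", "Other/Unknown"),
  ("CHA HALLWAY/STAIRWELL/ELEVATOR", "Other/Unknown"),
  ("CHA PARKING LOT/GROUNDS", "Other/Unknown"),
  ("CHA PARKING LOT / GROUNDS", "Other/Unknown") ]

-- Source B's body: _CATEGORY_OF.get(desc, "Other/Unknown")
def map_location_category_alt (desc : String) : String := categoryOf.getD desc "Other/Unknown"

-- ===== PRECONDITION & SPEC =====
def Spec_map_location_category (desc : String) (out : String) : Prop := out = map_location_category_alt desc
instance (desc : String) (out : String) : Decidable (Spec_map_location_category desc out) := by unfold Spec_map_location_category; infer_instance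

-- ===== CLAIM (what is proved, stated in full; the proofs are below) =====
def Claim_equal_map_location_category : Prop := ∀ (desc : String), Dom_map_location_category desc → Spec_map_location_category desc (map_location_category desc)

-- ===== LEMMAS AND PROOFS =====

-- first-match lookup over the concatenated pairs of a nested table
lemma get?_mk_append (l1 l2 : List (String × String)) (x : String) :
    (PySem.Dict.mk (l1 ++ l2)).get? x
      = ((PySem.Dict.mk l1).get? x).or ((PySem.Dict.mk l2).get? x) := by
  induction l1 with
  | nil =>
      have he : (PySem.Dict.mk ([] : List (String × String))).get? x = none := rfl
      rw [List.nil_append, he, Option.none_or]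
  | cons p l ih =>
      obtain ⟨a, b⟩ := p
      rw [List.cons_append, PySem.Dict.get?_mk_cons, PySem.Dict.get?_mk_cons, ih]
      by_cases h : a = x <;> simp [h]

lemma get?_mk_map (lst : List String) (cat x : String) :
    (PySem.Dict.mk (lst.map (fun d => (d, cat)))).get? x
      = (if x ∈ lst then some cat else none) := by
  induction lst with
  | nil => rfl
  | cons k lst ih =>
      rw [List.map_cons, PySem.Dict.get?_mk_cons, ih]
      by_cases h : k = x
      · simp [h]
      · have h' : ¬x = k := fun hh => h hh.symm
        simp [h, h']

lemma get?_mk_flatMap (m : List (String × List String)) (x : String) :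
    (PySem.Dict.mk (m.flatMap (fun p => p.2.map (fun d => (d, p.1))))).get? x
      = (if h : ∃ p ∈ m, x ∈ p.2 then some (locFind m x) else none) := by
  induction m with
  | nil => simp; rfl
  | cons p m ih =>
      obtain ⟨cat, lst⟩ := p
      rw [List.flatMap_cons, get?_mk_append, get?_mk_map, ih]
      by_cases h : x ∈ lst
      · simp [locFind, h]
      · by_cases h2 : ∃ p ∈ m, x ∈ p.2 <;> simp [locFind, h, h2]

-- the flat literal is exactly the pairs of A's nested table, in order
lemma categoryOf_eq :
    categoryOf = PySem.Dict.mk (locationMap.flatMap (fun p => p.2.map (fun d => (d, p.1)))) := rfl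

lemma locFind_of_not_mem (m : List (String × List String)) (x : String)
    (h : ¬∃ p ∈ m, x ∈ p.2) : locFind m x = "Other/Unknown" := by
  induction m with
  | nil => rfl
  | cons p m ih =>
      obtain ⟨cat, lst⟩ := p
      have h1 : x ∉ lst := fun hx => h ⟨(cat, lst), List.mem_cons_self .., hx⟩
      have h2 : ¬∃ p ∈ m, x ∈ p.2 := fun ⟨q, hq, hx⟩ => h ⟨q, List.mem_cons_of_mem _ hq, hx⟩
      simp [locFind, h1, ih h2]

-- ===== VERDICT (by name: the statement is the Claim_ definition above) =====
theorem map_location_category_spec : Claim_equal_map_location_category := by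
  intro desc _
  unfold Spec_map_location_category map_location_category map_location_category_alt
  rw [PySem.Dict.getD_eq_get?_getD, categoryOf_eq, get?_mk_flatMap]
  by_cases h : ∃ p ∈ locationMap, desc ∈ p.2
  · simp [h]
  · simp [h, locFind_of_not_mem _ _ h]
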